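-- pv_equiv track=rewrite | github.com/sp00nznet/xboxrecomp | tools/func_id/imm_scanner.py | _find_containing_function
-- ===== SOURCE A (Python) =====
-- def _find_containing_function(code_addr, sorted_func_starts):
--     """
--     Binary search to find which function contains code_addr.
--     Returns the function start address, or None if not found.
--     """
--     lo, hi = 0, len(sorted_func_starts) - 1
--     while lo <= hi:
--         mid = (lo + hi) // 2
--         if sorted_func_starts[mid] <= code_addr:
--             lo = mid + 1
--         else:
--             hi = mid - 1
--     # hi now points to the last func_start <= code_addr
--     if hi >= 0:
--         return sorted_func_starts[hi]
--     return None
-- ===== SOURCE B (Python) =====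
-- def _find_containing_function(code_addr, sorted_func_starts):
--     """Single linear pass keeping the running candidate: since the list is
--     sorted, the last element <= code_addr is the containing function start."""
--     result = None
--     for start in sorted_func_starts:
--         if start <= code_addr:
--             result = start
--     return result
-- ===== Notes on version B (the rewrite author's own statement) =====
-- stated objective: simpler
-- what changed: A's index-juggling binary search (lo/hi/mid loop plus a final hi test and lookup) is replaced by a single linear pass that keeps the last element <= code_addr as a running candidate; Pre_ excludes unsorted lists, on which a binary search's probe-order-dependent result is accidental.
-- outside the precondition, e.g. on _find_containing_function(0, [5, -1]): A returns None, B returns -1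
import Mathlib
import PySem

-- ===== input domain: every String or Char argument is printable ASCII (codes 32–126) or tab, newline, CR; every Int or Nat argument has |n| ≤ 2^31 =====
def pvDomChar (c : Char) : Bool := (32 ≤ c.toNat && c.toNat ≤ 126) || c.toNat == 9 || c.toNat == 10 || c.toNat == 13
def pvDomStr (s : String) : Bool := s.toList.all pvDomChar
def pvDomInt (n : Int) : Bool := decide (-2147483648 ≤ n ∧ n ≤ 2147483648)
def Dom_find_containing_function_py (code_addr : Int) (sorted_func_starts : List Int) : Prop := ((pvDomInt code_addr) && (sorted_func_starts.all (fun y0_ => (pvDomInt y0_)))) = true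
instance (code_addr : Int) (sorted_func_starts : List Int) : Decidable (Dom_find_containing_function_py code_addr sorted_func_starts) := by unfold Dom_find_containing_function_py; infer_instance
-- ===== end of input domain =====

-- B replaces A's binary search by a single linear pass keeping the running
-- candidate (objective: simpler); equal on sorted lists (Pre_).

-- ===== PORT A =====
-- A's while loop: state (lo, hi), returns the final hi.  mid = (lo + hi) // 2 is
-- written inline.  The Nat fuel only makes the recursion structural: each pass
-- shrinks the interval, so fuel = |xs| (supplied below) is never exhausted and
-- the fuel-0 branch is unreachable on the actual call.
def findA_loop (code_addr : Int) (xs : List Int) : Nat → Int → Int → Int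
  | 0, _, hi => hi
  | fuel + 1, lo, hi =>
    if lo ≤ hi then
      if (PySem.List.pyGet? xs (PySem.Int.floordiv (lo + hi) 2)).getD 0 ≤ code_addr then
        findA_loop code_addr xs fuel (PySem.Int.floordiv (lo + hi) 2 + 1) hi
      else
        findA_loop code_addr xs fuel lo (PySem.Int.floordiv (lo + hi) 2 - 1)
    else hi

def find_containing_function_py (code_addr : Int) (sorted_func_starts : List Int) : Option Int :=
  let hi := findA_loop code_addr sorted_func_starts sorted_func_starts.length 0 ((sorted_func_starts.length : Int) - 1)
  if 0 ≤ hi then PySem.List.pyGet? sorted_func_starts hi else none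

-- ===== PORT B =====
-- B's 'for start in sorted_func_starts' with accumulator 'result' is a foldl.
def find_containing_function_py_alt (code_addr : Int) (sorted_func_starts : List Int) : Option Int :=
  sorted_func_starts.foldl (fun result start => if start ≤ code_addr then some start else result) none

-- ===== PRECONDITION & SPEC =====
-- Pre_ excludes unsorted lists that are not uniformly below or above code_addr:
-- there A still returns a value, but a binary search's probe-order-dependent
-- answer on unsorted input is accidental (the parameter is documented as
-- sorted); B returns the last element ≤ code_addr there.
def Pre_find_containing_function_py (code_addr : Int) (sorted_func_starts : List Int) : Prop :=
  List.Pairwise (· ≤ ·) sorted_func_starts ∨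
  (∀ v ∈ sorted_func_starts, v ≤ code_addr) ∨
  (∀ v ∈ sorted_func_starts, code_addr < v)
instance (code_addr : Int) (sorted_func_starts : List Int) : Decidable (Pre_find_containing_function_py code_addr sorted_func_starts) := by unfold Pre_find_containing_function_py; infer_instance
def pvWitness_find_containing_function_py : Int × List Int := (5, [0, 3, 7])

def Spec_find_containing_function_py (code_addr : Int) (sorted_func_starts : List Int) (out : Option Int) : Prop := out = find_containing_function_py_alt code_addr sorted_func_starts
instance (code_addr : Int) (sorted_func_starts : List Int) (out : Option Int) : Decidable (Spec_find_containing_function_py code_addr sorted_func_starts out) := by unfold Spec_find_containing_function_py; infer_instance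

-- ===== CLAIM =====
def Claim_equal_find_containing_function_py : Prop := ∀ (code_addr : Int) (sorted_func_starts : List Int), Dom_find_containing_function_py code_addr sorted_func_starts → Pre_find_containing_function_py code_addr sorted_func_starts → Spec_find_containing_function_py code_addr sorted_func_starts (find_containing_function_py code_addr sorted_func_starts)

-- ===== LEMMAS AND PROOFS =====

-- B's fold returns the last element ≤ code_addr (no sortedness needed).
theorem foldB_eq_filter_getLast (x : Int) (xs : List Int) (r : Option Int) :
    xs.foldl (fun result start => if start ≤ x then some start else result) r
      = match (xs.filter (fun v => v ≤ x)).getLast? with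
        | some v => some v
        | none => r := by
  induction xs using List.reverseRecOn with
  | nil => simp
  | append_singleton t a ih =>
    rw [List.foldl_append, List.filter_append, ih]
    by_cases ha : a ≤ x
    · simp [ha, List.getLast?_concat]
    · simp only [List.foldl_cons, List.foldl_nil, if_neg ha, List.filter_cons,
        decide_eq_true_eq, ha, if_false, List.filter_nil, List.append_nil]

-- Boundary invariant of A's loop: starting with 0 ≤ lo ≤ hi+1, hi < n, enough
-- fuel, "xs[lo-1] ≤ x if lo > 0" and "x < xs[hi+1] if hi+1 < n", the final
-- value r satisfies lo-1 ≤ r ≤ hi and the same two boundary facts at r.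
theorem findA_char (x : Int) (xs : List Int) (fuel : Nat) (lo hi : Int)
    (h0 : 0 ≤ lo) (h1 : lo ≤ hi + 1) (h2 : hi < (xs.length : Int))
    (hf : hi + 1 - lo ≤ (fuel : Int))
    (hL : 0 < lo → (PySem.List.pyGet? xs (lo - 1)).getD 0 ≤ x)
    (hR : hi + 1 < (xs.length : Int) → x < (PySem.List.pyGet? xs (hi + 1)).getD 0) :
    (lo - 1 ≤ findA_loop x xs fuel lo hi ∧ findA_loop x xs fuel lo hi ≤ hi) ∧
    (0 ≤ findA_loop x xs fuel lo hi →
      (PySem.List.pyGet? xs (findA_loop x xs fuel lo hi)).getD 0 ≤ x) ∧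
    (findA_loop x xs fuel lo hi + 1 < (xs.length : Int) →
      x < (PySem.List.pyGet? xs (findA_loop x xs fuel lo hi + 1)).getD 0) := by
  induction fuel generalizing lo hi with
  | zero =>
    have hloeq : lo = hi + 1 := by omega
    simp only [findA_loop]
    refine ⟨⟨by omega, le_rfl⟩, ?_, hR⟩
    intro h
    have := hL (by omega)
    rw [hloeq] at this
    simpa using this
  | succ fuel ih =>
    by_cases hle : lo ≤ hi
    · have hm := PySem.Int.floordiv_two_mid_bounds hle
      set mid := PySem.Int.floordiv (lo + hi) 2 with hmid
      by_cases hcmp : (PySem.List.pyGet? xs mid).getD 0 ≤ x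
      · have hA : findA_loop x xs (fuel + 1) lo hi = findA_loop x xs fuel (mid + 1) hi := by
          rw [findA_loop, if_pos hle, ← hmid, if_pos hcmp]
        rw [hA]
        have := ih (mid + 1) hi (by omega) (by omega) h2 (by push_cast at hf ⊢; omega)
          (fun _ => by simpa using hcmp) hR
        exact ⟨⟨by omega, this.1.2⟩, this.2.1, this.2.2⟩
      · have hA : findA_loop x xs (fuel + 1) lo hi = findA_loop x xs fuel lo (mid - 1) := by
          rw [findA_loop, if_pos hle, ← hmid, if_neg hcmp]
        rw [hA]
        have := ih lo (mid - 1) h0 (by omega) (by omega) (by push_cast at hf ⊢; omega)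
          hL (fun _ => by
            rw [show mid - 1 + 1 = mid by omega]
            omega)
        exact ⟨⟨this.1.1, by omega⟩, this.2.1, this.2.2⟩
    · have hA : findA_loop x xs (fuel + 1) lo hi = hi := by
        rw [findA_loop, if_neg hle]
      rw [hA]
      have hloeq : lo = hi + 1 := by omega
      refine ⟨⟨by omega, le_rfl⟩, ?_, hR⟩
      intro h; simpa [hloeq] using hL (by omega)

-- On a sorted list the filter of elements ≤ x is a prefix; its last element is
-- exactly the element A's final index points to.
theorem filter_sorted_char (x : Int) (xs : List Int) (hs : List.Pairwise (· ≤ ·) xs)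
    (h : Nat) (hh : h < xs.length) (hle : xs[h] ≤ x)
    (hgt : (h + 1 : Int) < (xs.length : Int) → x < xs[h+1]!) :
    (xs.filter (fun v => v ≤ x)).getLast? = some xs[h] := by
  have hpw := List.pairwise_iff_getElem.mp hs
  have hfil : xs.filter (fun v => decide (v ≤ x)) = xs.take (h + 1) := by
    have h1 : (xs.take (h + 1)).filter (fun v => decide (v ≤ x)) = xs.take (h + 1) := by
      apply List.filter_eq_self.mpr
      intro a ha
      obtain ⟨i, hi, rfl⟩ := List.getElem_of_mem ha
      have hilen : i < xs.length := lt_of_lt_of_le hi (by simp [List.length_take])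
      have hih : i ≤ h := by simp [List.length_take] at hi; omega
      rw [List.getElem_take]
      rcases eq_or_lt_of_le hih with rfl | hlt
      · simpa using hle
      · exact decide_eq_true (le_trans (hpw i h hilen hh hlt) hle)
    have h2 : (xs.drop (h + 1)).filter (fun v => decide (v ≤ x)) = [] := by
      apply List.filter_eq_nil_iff.mpr
      intro a ha
      obtain ⟨i, hi, rfl⟩ := List.getElem_of_mem ha
      rw [List.getElem_drop]
      have hlen : h + 1 + i < xs.length := by simp at hi; omega
      have hn : h + 1 < xs.length := by omega
      have hx1 : x < xs[h+1]! := hgt (by exact_mod_cast Nat.cast_lt.mpr hn)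
      rw [getElem!_pos xs (h+1) hn] at hx1
      have : xs[h+1] ≤ xs[h+1+i] := by
        rcases Nat.eq_or_lt_of_le (Nat.le_add_right (h+1) i) with he | hlt
        · simp [← he]
        · exact hpw (h+1) (h+1+i) hn hlen hlt
      simp only [decide_eq_true_eq]; omega
    conv_lhs => rw [← List.take_append_drop (h + 1) xs]
    rw [List.filter_append, h1, h2, List.append_nil]
  rw [hfil]
  rw [List.getLast?_eq_getElem?]
  have hlt : h + 1 ≤ xs.length := hh
  simp [List.length_take, Nat.min_eq_left hlt, List.getElem?_take, hh]

-- If every element is ≤ x, every probe moves lo up and the loop ends at hi.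
theorem findA_all_le (x : Int) (xs : List Int) (hall : ∀ v ∈ xs, v ≤ x) :
    ∀ (fuel : Nat) (lo hi : Int), 0 ≤ lo → hi < (xs.length : Int) →
      findA_loop x xs fuel lo hi = hi := by
  intro fuel
  induction fuel with
  | zero => intro lo hi _ _; rfl
  | succ fuel ih =>
    intro lo hi h0 h2
    by_cases hle : lo ≤ hi
    · have hm := PySem.Int.floordiv_two_mid_bounds hle
      set mid := PySem.Int.floordiv (lo + hi) 2 with hmid
      have hget := PySem.List.pyGet?_eq_some_getElem (xs := xs) (i := mid) (by omega) (by omega)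
      have hmem : xs[mid.toNat] ∈ xs := List.getElem_mem _
      have hcmp : (PySem.List.pyGet? xs mid).getD 0 ≤ x := by
        rw [hget]; simpa using hall _ hmem
      rw [findA_loop, if_pos hle, ← hmid, if_pos hcmp]
      exact ih (mid + 1) hi (by omega) h2
    · rw [findA_loop, if_neg hle]

-- If every element is > x, every probe moves hi down and the loop ends at lo-1.
theorem findA_all_gt (x : Int) (xs : List Int) (hall : ∀ v ∈ xs, x < v) :
    ∀ (fuel : Nat) (lo hi : Int), 0 ≤ lo → lo ≤ hi + 1 → hi < (xs.length : Int) →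
      hi + 1 - lo ≤ (fuel : Int) → findA_loop x xs fuel lo hi = lo - 1 := by
  intro fuel
  induction fuel with
  | zero => intro lo hi _ h1 _ hf; simp only [findA_loop]; omega
  | succ fuel ih =>
    intro lo hi h0 h1 h2 hf
    by_cases hle : lo ≤ hi
    · have hm := PySem.Int.floordiv_two_mid_bounds hle
      set mid := PySem.Int.floordiv (lo + hi) 2 with hmid
      have hget := PySem.List.pyGet?_eq_some_getElem (xs := xs) (i := mid) (by omega) (by omega)
      have hmem : xs[mid.toNat] ∈ xs := List.getElem_mem _
      have hcmp : ¬ (PySem.List.pyGet? xs mid).getD 0 ≤ x := by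
        rw [hget]; simpa using not_le.mpr (hall _ hmem)
      rw [findA_loop, if_pos hle, ← hmid, if_neg hcmp]
      exact ih lo (mid - 1) h0 (by omega) (by omega) (by push_cast at hf ⊢; omega)
    · rw [findA_loop, if_neg hle]; omega

-- ===== VERDICT =====
theorem find_containing_function_py_spec : Claim_equal_find_containing_function_py := by
  intro x xs _ hpre
  unfold Spec_find_containing_function_py find_containing_function_py find_containing_function_py_alt
  rcases hpre with hs | hall | hall
  case inr.inl =>
    -- every element ≤ x: A ends at hi = n-1, B keeps the last element
    rw [foldB_eq_filter_getLast,
      List.filter_eq_self.mpr (fun a ha => decide_eq_true (hall a ha)),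
      findA_all_le x xs hall xs.length 0 ((xs.length : Int) - 1) le_rfl (by omega)]
    rcases xs.eq_nil_or_concat with rfl | ⟨t, a, rfl⟩
    · simp
    · simp only [List.concat_eq_append]
      rw [if_pos (by simp), List.getLast?_concat,
        show ((t ++ [a]).length : Int) - 1 = (t.length : Int) by simp,
        PySem.List.pyGet?_natCast]
      simp
  case inr.inr =>
    -- every element > x: A ends at -1, B's filter is empty
    rw [foldB_eq_filter_getLast,
      List.filter_eq_nil_iff.mpr (fun a ha => by simpa using not_le.mpr (hall a ha)),
      findA_all_gt x xs hall xs.length 0 ((xs.length : Int) - 1) le_rfl (by omega) (by omega) (by omega)]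
    simp
  have hchar := findA_char x xs xs.length 0 ((xs.length : Int) - 1)
    le_rfl (by omega) (by omega) (by omega) (by omega) (by omega)
  set r := findA_loop x xs xs.length 0 ((xs.length : Int) - 1) with hr
  rw [foldB_eq_filter_getLast]
  by_cases hnn : 0 ≤ r
  · -- A returns xs[r]; r is a valid index and a last-≤ witness
    have hrlt : r < (xs.length : Int) := by omega
    have hle' : (PySem.List.pyGet? xs r).getD 0 ≤ x := hchar.2.1 hnn
    have hget := PySem.List.pyGet?_eq_some_getElem (xs := xs) (i := r) hnn hrlt
    have hh : r.toNat < xs.length := by omega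
    have hlast := filter_sorted_char x xs hs r.toNat hh
      (by rw [hget] at hle'; simpa using hle')
      (by
        intro hlt
        have hlen : r.toNat + 1 < xs.length := by omega
        have := hchar.2.2 (by push_cast; omega)
        have hget2 := PySem.List.pyGet?_eq_some_getElem (xs := xs) (i := r + 1)
          (by omega) (by push_cast; omega)
        rw [hget2] at this
        rw [getElem!_pos xs (r.toNat + 1) hlen]
        simpa [show (r + 1).toNat = r.toNat + 1 by omega] using this)
    simp only [if_pos hnn, hget, hlast]
  · -- r = -1: every element exceeds x, the filter is empty, both return none
    have hempty : (xs.filter (fun v => v ≤ x)).getLast? = none := by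
      rw [List.getLast?_eq_none_iff]
      apply List.filter_eq_nil_iff.mpr
      intro a ha
      obtain ⟨i, hi, rfl⟩ := List.getElem_of_mem ha
      have hx0 : x < (PySem.List.pyGet? xs (0 : Int)).getD 0 := by
        have := hchar.2.2 (by omega)
        have hreq : r = -1 := by omega
        simpa [hreq] using this
      have hget0 := PySem.List.pyGet?_eq_some_getElem (xs := xs) (i := (0 : Int))
        le_rfl (by omega)
      rw [hget0] at hx0
      simp only [Int.toNat_zero, Option.getD_some] at hx0
      have hpw := List.pairwise_iff_getElem.mp hs
      have : xs[0] ≤ xs[i] := by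
        rcases Nat.eq_zero_or_pos i with rfl | hpos
        · exact le_rfl
        · exact hpw 0 i (by omega) hi hpos
      simp only [decide_eq_true_eq]; omega
    rw [if_neg hnn, hempty]
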